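-- pv_equiv track=rewrite | github.com/adit-chandra/project-groot | utils.py | count_shared_single
-- ===== SOURCE A (Python) =====
-- def count_shared_single(line):  # count nshare only, for shared kmer table
--     line = line.split()
--     if line[0][0].isdigit():
--         sn = len(line)
--         flag = 'd'
--     else:
--         sn = len(line) - 1
--         flag = 'k'
--     shared = [[0] * sn for i in range(sn)]
--     if flag == 'k':
--         line = line[1:]
--     line = [int(i) for i in line]
--     for i in range(sn):
--         for j in range(i + 1, sn):
--             if line[i] * line[j] != 0:
--                 shared[i][j] += 1
--     return shared
-- ===== SOURCE B (Python) =====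
-- def count_shared_single(line):  # index the nonzero positions, then fill only those upper-triangle cells
--     toks = line.split()
--     if toks[0][0].isdigit():
--         sn = len(toks)
--     else:
--         sn = len(toks) - 1
--         toks = toks[1:]
--     vals = [int(t) for t in toks]
--     nz = [i for i, v in enumerate(vals) if v != 0]
--     shared = [[0] * sn for _ in range(sn)]
--     rest = nz
--     while rest:
--         a, rest = rest[0], rest[1:]
--         for b in rest:
--             shared[a][b] = 1
--     return shared
-- ===== Notes on version B (the rewrite author's own statement) =====
-- stated objective: alternative
-- what changed: Instead of A's all-pairs double loop that tests every (i, j) product, B builds the list of nonzero positions once and fills a 1 only at each pair of nonzero indices (a, b) with a < b, peeling the index list front-to-back.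
import Mathlib
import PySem

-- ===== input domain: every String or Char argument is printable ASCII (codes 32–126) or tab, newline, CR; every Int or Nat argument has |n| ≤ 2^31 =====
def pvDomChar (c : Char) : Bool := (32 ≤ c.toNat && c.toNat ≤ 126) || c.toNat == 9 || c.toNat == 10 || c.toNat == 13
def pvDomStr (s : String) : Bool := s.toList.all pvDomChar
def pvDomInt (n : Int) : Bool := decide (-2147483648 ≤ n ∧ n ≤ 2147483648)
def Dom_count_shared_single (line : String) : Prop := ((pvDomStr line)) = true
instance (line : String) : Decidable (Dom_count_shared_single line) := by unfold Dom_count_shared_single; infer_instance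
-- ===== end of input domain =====

-- B replaces A's all-pairs nested scan with an index of the nonzero positions and fills only those
-- upper-triangle cells (objective: alternative decomposition; same parsing prologue).

-- ===== PORT A =====
def count_shared_single (line : String) : List (List Int) :=
  let toks := PySem.Str.split₀ line
  match toks with
  | [] => []  -- line[0] raises IndexError; excluded by Pre_
  | t0 :: _ =>
    let fd : Bool := match PySem.Str.pyGet? t0 0 with
      | some c => PySem.Chars.isdigit c
      | none => false
    let sn : Nat := if fd then toks.length else toks.length - 1
    let shared : List (List Int) := (List.range sn).map (fun _ => List.replicate sn (0 : Int))
    let body := if fd then toks else PySem.List.slice toks (some 1) none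
    let vals : List Int := body.map (fun t => (PySem.Int.ofStr? t).getD 0)  -- int(i); failure excluded by Pre_
    (PySem.List.pyRange 0 (sn : Int) 1).foldl (fun m i =>
      (PySem.List.pyRange (i + 1) (sn : Int) 1).foldl (fun m j =>
        if PySem.List.pyGetD vals i 0 * PySem.List.pyGetD vals j 0 ≠ 0 then
          PySem.List.pySetD m i
            (PySem.List.pySetD (PySem.List.pyGetD m i []) j
              (PySem.List.pyGetD (PySem.List.pyGetD m i []) j 0 + 1))
        else m) m) shared

-- ===== PORT B =====
-- the while-loop of Source B: peel the first nonzero index a, mark (a, b) for every later nonzero b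
def pvFill : List Int → List (List Int) → List (List Int)
  | [], m => m
  | a :: rest, m =>
      pvFill rest (rest.foldl (fun m b =>
        PySem.List.pySetD m a (PySem.List.pySetD (PySem.List.pyGetD m a []) b 1)) m)

def count_shared_single_alt (line : String) : List (List Int) :=
  let toks := PySem.Str.split₀ line
  match toks with
  | [] => []  -- toks[0] raises IndexError; excluded by Pre_
  | t0 :: _ =>
    let fd : Bool := match PySem.Str.pyGet? t0 0 with
      | some c => PySem.Chars.isdigit c
      | none => false
    let sn : Nat := if fd then toks.length else toks.length - 1
    let body := if fd then toks else PySem.List.slice toks (some 1) none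
    let vals : List Int := body.map (fun t => (PySem.Int.ofStr? t).getD 0)
    let nz : List Int := ((PySem.List.enumerate vals 0).filter (fun p => p.2 != 0)).map (·.1)
    let shared : List (List Int) := (List.range sn).map (fun _ => List.replicate sn (0 : Int))
    pvFill nz shared

-- ===== PRECONDITION & SPEC =====
-- Pre_ excludes exactly the inputs where Python A raises: a blank line (IndexError on line[0])
-- and lines whose converted tokens are not all int()-parseable (ValueError).
def Pre_count_shared_single (line : String) : Prop :=
  PySem.Str.split₀ line ≠ [] ∧
  ∀ t ∈ (if (match PySem.Str.pyGet? ((PySem.Str.split₀ line).headD "") 0 with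
             | some c => PySem.Chars.isdigit c
             | none => false)
         then PySem.Str.split₀ line
         else PySem.List.slice (PySem.Str.split₀ line) (some 1) none),
    (PySem.Int.ofStr? t).isSome = true
instance (line : String) : Decidable (Pre_count_shared_single line) := by
  unfold Pre_count_shared_single; infer_instance

def pvWitness_count_shared_single : String := "kmer 3 0 -2"

def Spec_count_shared_single (line : String) (out : List (List Int)) : Prop := out = count_shared_single_alt line
instance (line : String) (out : List (List Int)) : Decidable (Spec_count_shared_single line out) := by unfold Spec_count_shared_single; infer_instance

-- ===== CLAIM (what is proved, stated in full; the proofs are below) =====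
def Claim_equal_count_shared_single : Prop := ∀ (line : String), Dom_count_shared_single line → Pre_count_shared_single line → Spec_count_shared_single line (count_shared_single line)

-- ===== LEMMAS AND PROOFS =====

-- matrix cell (i, j), with Python's defaults factored out
def pvEntry (m : List (List Int)) (i j : Nat) : Int := (m.getD i []).getD j 0

-- the zero matrix both ports start from
def pvZeroM (n : Nat) : List (List Int) := (List.range n).map (fun _ => List.replicate n (0 : Int))

theorem pvZeroM_length (n : Nat) : (pvZeroM n).length = n := by simp [pvZeroM]

theorem pvZeroM_rows (n : Nat) : ∀ r ∈ pvZeroM n, r.length = n := by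
  intro r hr; simp [pvZeroM] at hr; simp [hr]

theorem pv_getD_replicate (n j : Nat) : (List.replicate n (0 : Int)).getD j 0 = 0 := by
  simp only [List.getD_eq_getElem?_getD, List.getElem?_replicate]
  split_ifs <;> rfl

theorem pvZeroM_entry (n i j : Nat) : pvEntry (pvZeroM n) i j = 0 := by
  unfold pvEntry
  rcases lt_or_ge i n with h | h
  · have hrow : (pvZeroM n).getD i [] = List.replicate n 0 := by
      rw [List.getD_eq_getElem _ _ (by rw [pvZeroM_length]; exact h)]
      simp [pvZeroM]
    rw [hrow, pv_getD_replicate]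
  · have hrow : (pvZeroM n).getD i [] = [] :=
      List.getD_eq_default _ _ (by rw [pvZeroM_length]; exact h)
    rw [hrow]; rfl

theorem pv_getD_set {α : Type} (l : List α) (i k : Nat) (v d : α) :
    (l.set i v).getD k d = if k = i ∧ i < l.length then v else l.getD k d := by
  simp only [List.getD_eq_getElem?_getD, List.getElem?_set]
  split_ifs <;> simp_all

-- an inner loop writing only row i equals a single row update
theorem pv_inner_eq (f : List Int → Int → List Int) (i : Int) :
    ∀ (L : List Int) (m : List (List Int)), 0 ≤ i → i.toNat < m.length →
    L.foldl (fun m j => PySem.List.pySetD m i (f (PySem.List.pyGetD m i []) j)) m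
      = m.set i.toNat (L.foldl f (m.getD i.toNat [])) := by
  intro L
  induction L with
  | nil =>
    intro m h0 hi
    simp only [List.foldl_nil]
    rw [List.getD_eq_getElem _ _ hi, List.set_getElem_self]
  | cons j L ih =>
    intro m h0 hi
    simp only [List.foldl_cons]
    have hm : PySem.List.pySetD m i (f (PySem.List.pyGetD m i []) j)
        = m.set i.toNat (f (m.getD i.toNat []) j) := by
      rw [PySem.List.pySetD_of_nonneg _ _ h0,
          PySem.List.pyGetD_eq_getElem _ _ h0 (by omega), List.getD_eq_getElem _ _ hi]
    rw [hm, ih _ h0 (by simpa using hi), List.set_set]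
    congr 1
    rw [pv_getD_set, if_pos (show i.toNat = i.toNat ∧ i.toNat < m.length from ⟨rfl, hi⟩)]

theorem pv_row_length (c : Int → Prop) [DecidablePred c] (u : Int → Int) :
    ∀ (L : List Int) (r : List Int),
    (L.foldl (fun r j => if c j then PySem.List.pySetD r j (u (PySem.List.pyGetD r j 0)) else r) r).length = r.length := by
  intro L
  induction L with
  | nil => intro r; rfl
  | cons j L ih =>
    intro r
    simp only [List.foldl_cons]
    rw [ih]
    split_ifs <;> simp [PySem.List.length_pySetD]

theorem pv_row_entry (c : Int → Prop) [DecidablePred c] (u : Int → Int) :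
    ∀ (L : List Int) (r : List Int), L.Nodup → (∀ j ∈ L, 0 ≤ j) → ∀ (k : Nat),
    (L.foldl (fun r j => if c j then PySem.List.pySetD r j (u (PySem.List.pyGetD r j 0)) else r) r).getD k 0
      = if (k : Int) ∈ L ∧ c k ∧ k < r.length then u (r.getD k 0) else r.getD k 0 := by
  intro L
  induction L with
  | nil => intro r _ _ k; simp
  | cons j L ih =>
    intro r hnd hnn k
    have hj0 : 0 ≤ j := hnn j (by simp)
    have hjL : j ∉ L := (List.nodup_cons.mp hnd).1
    simp only [List.foldl_cons]
    set r1 := if c j then PySem.List.pySetD r j (u (PySem.List.pyGetD r j 0)) else r with hr1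
    have hlen : r1.length = r.length := by
      rw [hr1]; split_ifs <;> simp [PySem.List.length_pySetD]
    have hval : r1.getD k 0 = if (k : Int) = j ∧ c j ∧ k < r.length then u (r.getD k 0) else r.getD k 0 := by
      rw [hr1]
      by_cases hc : c j
      · rw [if_pos hc, PySem.List.pySetD_of_nonneg _ _ hj0, pv_getD_set]
        by_cases hk : (k : Int) = j
        · have hkn : k = j.toNat := by omega
          by_cases hkr : k < r.length
          · rw [if_pos (show k = j.toNat ∧ j.toNat < r.length from ⟨hkn, by omega⟩), if_pos ⟨hk, hc, hkr⟩]
            congr 1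
            rw [PySem.List.pyGetD_eq_getElem _ _ hj0 (by omega), List.getD_eq_getElem _ _ (by omega)]
            congr 1; omega
          · rw [if_neg (by omega), if_neg (by tauto)]
        · rw [if_neg (by omega), if_neg (by tauto)]
      · rw [if_neg hc, if_neg (by tauto)]
    rw [ih r1 (List.nodup_cons.mp hnd).2 (fun x hx => hnn x (by simp [hx])) k, hlen, hval]
    by_cases hkj : (k : Int) = j <;> by_cases hkL : (k : Int) ∈ L <;>
      by_cases hck : c (k : Int) <;> by_cases hkr : k < r.length <;>
      simp_all [List.mem_cons]

-- conditional variant (A's inner loop carries the nonzero test)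
theorem pv_inner_eq' (c : Int → Prop) [DecidablePred c] (f : List Int → Int → List Int) (i : Int) :
    ∀ (L : List Int) (m : List (List Int)), 0 ≤ i → i.toNat < m.length →
    L.foldl (fun m j => if c j then PySem.List.pySetD m i (f (PySem.List.pyGetD m i []) j) else m) m
      = m.set i.toNat (L.foldl (fun r j => if c j then f r j else r) (m.getD i.toNat [])) := by
  intro L
  induction L with
  | nil =>
    intro m h0 hi
    simp only [List.foldl_nil]
    rw [List.getD_eq_getElem _ _ hi, List.set_getElem_self]
  | cons j L ih =>
    intro m h0 hi
    simp only [List.foldl_cons]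
    by_cases hc : c j
    · rw [if_pos hc, if_pos hc]
      have hm : PySem.List.pySetD m i (f (PySem.List.pyGetD m i []) j)
          = m.set i.toNat (f (m.getD i.toNat []) j) := by
        rw [PySem.List.pySetD_of_nonneg _ _ h0,
            PySem.List.pyGetD_eq_getElem _ _ h0 (by omega), List.getD_eq_getElem _ _ hi]
      rw [hm, ih _ h0 (by simpa using hi), List.set_set]
      congr 1
      rw [pv_getD_set, if_pos (show i.toNat = i.toNat ∧ i.toNat < m.length from ⟨rfl, hi⟩)]
    · rw [if_neg hc, if_neg hc]
      exact ih _ h0 hi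

-- two folds whose steps agree on accumulators of the invariant length
theorem pv_foldl_congr_len (K : List Int) (S T : List (List Int) → Int → List (List Int)) (N : Nat)
    (hT : ∀ m a, (T m a).length = m.length)
    (h : ∀ m a, a ∈ K → m.length = N → S m a = T m a) :
    ∀ m, m.length = N → K.foldl S m = K.foldl T m := by
  induction K with
  | nil => intro m _; rfl
  | cons a K ih =>
    intro m hm
    simp only [List.foldl_cons]
    rw [h m a (by simp) hm]
    exact ih (fun m a ha => h m a (by simp [ha])) _ (by rw [hT, hm])

-- an outer loop of single-row updates at strictly increasing row indices
theorem pv_outer_entry (g : Int → List Int → List Int) :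
    ∀ (K : List Int) (m : List (List Int)), K.Pairwise (· < ·) →
    (∀ a ∈ K, 0 ≤ a ∧ a.toNat < m.length) → ∀ (i : Nat),
    (K.foldl (fun m a => m.set a.toNat (g a (m.getD a.toNat []))) m).getD i []
      = if (i : Int) ∈ K then g (i : Int) (m.getD i []) else m.getD i [] := by
  intro K
  induction K with
  | nil => intro m _ _ i; simp
  | cons a K ih =>
    intro m hpw hb i
    obtain ⟨ha0, haM⟩ := hb a (by simp)
    have hrest : ∀ b ∈ K, a < b := fun b hb' => (List.pairwise_cons.mp hpw).1 b hb'
    simp only [List.foldl_cons]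
    rw [ih _ (List.pairwise_cons.mp hpw).2
        (fun b hb' => by rw [List.length_set]; exact hb b (by simp [hb'])) i]
    have hset : (m.set a.toNat (g a (m.getD a.toNat []))).getD i []
        = if i = a.toNat ∧ a.toNat < m.length then g a (m.getD a.toNat []) else m.getD i [] :=
      pv_getD_set _ _ _ _ _
    by_cases hiK : (i : Int) ∈ K
    · have hai : a < (i : Int) := hrest _ hiK
      have : ¬ (i = a.toNat ∧ a.toNat < m.length) := by omega
      rw [if_pos hiK, if_pos (by simp [hiK]), hset, if_neg this]
    · by_cases hia : i = a.toNat
      · have hai : (i : Int) = a := by omega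
        rw [if_neg hiK, hset, if_pos ⟨hia, haM⟩, if_pos (by simp [hai]), hai]
        subst hia
        rfl
      · have : (i : Int) ∉ a :: K := by
          intro h'
          rcases List.mem_cons.mp h' with h' | h'
          · omega
          · exact hiK h'
        rw [if_neg hiK, hset, if_neg (by tauto), if_neg this]

theorem pv_outer_length (g : Int → List Int → List Int) :
    ∀ (K : List Int) (m : List (List Int)),
    (K.foldl (fun m a => m.set a.toNat (g a (m.getD a.toNat []))) m).length = m.length := by
  intro K
  induction K with
  | nil => intro m; rfl
  | cons a K ih => intro m; simp only [List.foldl_cons]; rw [ih, List.length_set]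

theorem pv_outer_rows (g : Int → List Int → List Int) (W : Nat)
    (hg : ∀ a r, (g a r).length = r.length) :
    ∀ (K : List Int) (m : List (List Int)), (∀ a ∈ K, a.toNat < m.length) → (∀ r ∈ m, r.length = W) →
    ∀ r ∈ K.foldl (fun m a => m.set a.toNat (g a (m.getD a.toNat []))) m, r.length = W := by
  intro K
  induction K with
  | nil => exact fun m _ hm => hm
  | cons a K ih =>
    intro m hb hm
    have ha : a.toNat < m.length := hb a (by simp)
    simp only [List.foldl_cons]
    refine ih _ (fun b hb' => by rw [List.length_set]; exact hb b (by simp [hb'])) (fun r hr => ?_)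
    rcases List.mem_or_eq_of_mem_set hr with hr | hr
    · exact hm r hr
    · rw [hr, hg, List.getD_eq_getElem _ _ ha]
      exact hm _ (List.getElem_mem ha)

-- B's nonzero index: membership and order
theorem pv_nz_mem : ∀ (v : List Int) (s x : Int),
    x ∈ ((PySem.List.enumerate v s).filter (fun p => p.2 != 0)).map (·.1) ↔
    ∃ k : Nat, k < v.length ∧ x = s + k ∧ v.getD k 0 ≠ 0 := by
  intro v
  induction v with
  | nil => intro s x; simp [PySem.List.enumerate]
  | cons a v ih =>
    intro s x
    rw [PySem.List.enumerate_cons, List.filter_cons]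
    by_cases ha : a = 0
    · rw [if_neg (by simp [ha])]
      rw [ih (s + 1) x]
      constructor
      · rintro ⟨k, hk, hx, hnz⟩
        exact ⟨k + 1, by simpa using hk, by push_cast; omega, by simpa using hnz⟩
      · rintro ⟨k, hk, hx, hnz⟩
        match k with
        | 0 => exact absurd (by simpa using ha) hnz
        | k + 1 => exact ⟨k, by simpa using hk, by push_cast at hx ⊢; omega, by simpa using hnz⟩
    · rw [if_pos (by simp [ha])]
      simp only [List.map_cons, List.mem_cons, ih (s + 1) x]
      constructor
      · rintro (hx | ⟨k, hk, hx, hnz⟩)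
        · exact ⟨0, by simp, by simpa using hx, by simpa using ha⟩
        · exact ⟨k + 1, by simpa using hk, by push_cast; omega, by simpa using hnz⟩
      · rintro ⟨k, hk, hx, hnz⟩
        match k with
        | 0 => exact Or.inl (by simpa using hx)
        | k + 1 => exact Or.inr ⟨k, by simpa using hk, by push_cast at hx ⊢; omega, by simpa using hnz⟩

theorem pv_nz_mem_nat (v : List Int) (k : Nat) :
    ((k : Int) ∈ ((PySem.List.enumerate v 0).filter (fun p => p.2 != 0)).map (·.1)) ↔
    (k < v.length ∧ v.getD k 0 ≠ 0) := by
  rw [pv_nz_mem]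
  constructor
  · rintro ⟨k', hk', hx, hnz⟩
    have : k = k' := by omega
    exact ⟨this ▸ hk', this ▸ hnz⟩
  · rintro ⟨hk, hnz⟩
    exact ⟨k, hk, by omega, hnz⟩

theorem pv_nz_pairwise (v : List Int) :
    (((PySem.List.enumerate v 0).filter (fun p => p.2 != 0)).map (·.1)).Pairwise (· < ·) := by
  rw [List.pairwise_map]
  refine List.Pairwise.sublist List.filter_sublist ?_
  rw [← List.pairwise_map (f := fun p : Int × Int => p.1)]
  rw [PySem.List.map_fst_enumerate]
  exact PySem.List.pairwise_lt_pyRange_one _ _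

-- B's fill loop: shape preserved, and exactly the (a, b) cells with a < b both nonzero get a 1
theorem pvFill_main : ∀ (nz : List Int) (m : List (List Int)) (W : Nat),
    nz.Pairwise (· < ·) →
    (∀ a ∈ nz, 0 ≤ a ∧ a.toNat < m.length ∧ a.toNat < W) →
    (∀ r ∈ m, r.length = W) →
    (pvFill nz m).length = m.length ∧ (∀ r ∈ pvFill nz m, r.length = W) ∧
    ∀ i j : Nat, pvEntry (pvFill nz m) i j =
      if ((i : Int) ∈ nz ∧ (j : Int) ∈ nz ∧ i < j) then 1 else pvEntry m i j := by
  intro nz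
  induction nz with
  | nil =>
    intro m W _ _ hrows
    exact ⟨rfl, hrows, by intro i j; simp [pvFill]⟩
  | cons a rest ih =>
    intro m W hpw hb hrows
    obtain ⟨ha0, haM, haW⟩ := hb a (by simp)
    have hrest : ∀ b ∈ rest, a < b := (List.pairwise_cons.mp hpw).1
    have hnn : ∀ b ∈ rest, 0 ≤ b := fun b hb' => (hb b (by simp [hb'])).1
    have hnd : rest.Nodup := ((List.pairwise_cons.mp hpw).2).imp (fun h => ne_of_lt h)
    have hbaselen : (m.getD a.toNat []).length = W := by
      rw [List.getD_eq_getElem _ _ haM]; exact hrows _ (List.getElem_mem haM)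
    have hmassage : (fun r (b : Int) => PySem.List.pySetD r b (1 : Int))
        = (fun r b => if (fun _ : Int => True) b then
            PySem.List.pySetD r b ((fun _ => (1 : Int)) (PySem.List.pyGetD r b 0)) else r) := by
      funext r b; simp
    have hstep : pvFill (a :: rest) m = pvFill rest
        (m.set a.toNat (rest.foldl (fun r b => PySem.List.pySetD r b 1) (m.getD a.toNat []))) := by
      show pvFill rest _ = _
      congr 1
      exact pv_inner_eq (fun r b => PySem.List.pySetD r b 1) a rest m ha0 haM
    set row := rest.foldl (fun r b => PySem.List.pySetD r b 1) (m.getD a.toNat []) with hrow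
    set m1 := m.set a.toNat row with hm1
    have hrowlen : row.length = W := by
      rw [hrow, hmassage]
      exact (pv_row_length (fun _ : Int => True) (fun _ => (1 : Int)) rest _).trans hbaselen
    have hrowget : ∀ j : Nat, row.getD j 0
        = if ((j : Int) ∈ rest) then 1 else (m.getD a.toNat []).getD j 0 := by
      intro j
      rw [hrow, hmassage, pv_row_entry (fun _ => True) (fun _ => 1) rest _ hnd hnn j]
      by_cases hj : (j : Int) ∈ rest
      · have hjW : j < W := by have := (hb _ (List.mem_cons_of_mem a hj)).2.2; omega
        rw [if_pos ⟨hj, trivial, by omega⟩, if_pos hj]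
      · rw [if_neg (by tauto), if_neg hj]
    have hm1len : m1.length = m.length := by rw [hm1, List.length_set]
    have hm1rows : ∀ r ∈ m1, r.length = W := by
      intro r hr
      rcases List.mem_or_eq_of_mem_set hr with hr | hr
      · exact hrows r hr
      · rw [hr]; exact hrowlen
    have hm1entry : ∀ i j : Nat, pvEntry m1 i j
        = if (i = a.toNat ∧ (j : Int) ∈ rest) then 1 else pvEntry m i j := by
      intro i j
      unfold pvEntry
      rw [hm1, pv_getD_set]
      by_cases hia : i = a.toNat
      · rw [if_pos ⟨hia, haM⟩, hrowget j]
        by_cases hj : (j : Int) ∈ rest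
        · rw [if_pos hj, if_pos ⟨hia, hj⟩]
        · rw [if_neg hj, if_neg (by tauto), hia]
      · rw [if_neg (by tauto), if_neg (by tauto)]
    obtain ⟨ihlen, ihrows, ihentry⟩ := ih m1 W (List.pairwise_cons.mp hpw).2
      (fun b hb' => ⟨(hb b (by simp [hb'])).1,
        by rw [hm1len]; exact (hb b (by simp [hb'])).2.1, (hb b (by simp [hb'])).2.2⟩)
      hm1rows
    refine ⟨by rw [hstep, ihlen, hm1len], by rw [hstep]; exact ihrows, ?_⟩
    intro i j
    rw [hstep, ihentry i j, hm1entry i j]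
    by_cases h1 : (i : Int) ∈ rest ∧ (j : Int) ∈ rest ∧ i < j
    · rw [if_pos h1, if_pos ⟨List.mem_cons_of_mem a h1.1, List.mem_cons_of_mem a h1.2.1, h1.2.2⟩]
    · rw [if_neg h1]
      by_cases h2 : i = a.toNat ∧ (j : Int) ∈ rest
      · have hij : i < j := by have := hrest _ h2.2; omega
        rw [if_pos h2, if_pos ⟨by rw [show ((i : Int)) = a by omega]; exact List.mem_cons_self,
          List.mem_cons_of_mem a h2.2, hij⟩]
      · rw [if_neg h2, if_neg ?_]
        rintro ⟨hi', hj', hij⟩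
        rcases List.mem_cons.mp hj' with hj'' | hj''
        · rcases List.mem_cons.mp hi' with hi'' | hi''
          · omega
          · have := hrest _ hi''; omega
        · rcases List.mem_cons.mp hi' with hi'' | hi''
          · exact h2 ⟨by omega, hj''⟩
          · exact h1 ⟨hi'', hj'', hij⟩

-- A's row i after its inner loop
def pvRowA (vals : List Int) (sn : Nat) (i : Int) (r : List Int) : List Int :=
  (PySem.List.pyRange (i + 1) (sn : Int) 1).foldl
    (fun r j => if PySem.List.pyGetD vals i 0 * PySem.List.pyGetD vals j 0 ≠ 0 then
        PySem.List.pySetD r j (PySem.List.pyGetD r j 0 + 1) else r) r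

-- the heart of the equivalence: A's all-pairs double loop and B's nonzero-index fill build the same matrix
theorem pv_main (vals : List Int) (sn : Nat) (hlen : vals.length = sn) :
    (PySem.List.pyRange 0 (sn : Int) 1).foldl (fun m i =>
      (PySem.List.pyRange (i + 1) (sn : Int) 1).foldl (fun m j =>
        if PySem.List.pyGetD vals i 0 * PySem.List.pyGetD vals j 0 ≠ 0 then
          PySem.List.pySetD m i
            (PySem.List.pySetD (PySem.List.pyGetD m i []) j
              (PySem.List.pyGetD (PySem.List.pyGetD m i []) j 0 + 1))
        else m) m) (pvZeroM sn)
    = pvFill (((PySem.List.enumerate vals 0).filter (fun p => p.2 != 0)).map (·.1)) (pvZeroM sn) := by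
  have hZlen := pvZeroM_length sn
  have hZrows := pvZeroM_rows sn
  set nz := ((PySem.List.enumerate vals 0).filter (fun p => p.2 != 0)).map (·.1) with hnz
  have hnzmem : ∀ k : Nat, ((k : Int) ∈ nz ↔ (k < sn ∧ vals.getD k 0 ≠ 0)) := by
    intro k; rw [hnz, pv_nz_mem_nat, hlen]
  have hnzb : ∀ a ∈ nz, 0 ≤ a ∧ a.toNat < sn := by
    intro a ha
    rw [hnz, pv_nz_mem] at ha
    obtain ⟨k, hk, hak, _⟩ := ha
    constructor <;> omega
  have hA : (PySem.List.pyRange 0 (sn : Int) 1).foldl (fun m i =>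
      (PySem.List.pyRange (i + 1) (sn : Int) 1).foldl (fun m j =>
        if PySem.List.pyGetD vals i 0 * PySem.List.pyGetD vals j 0 ≠ 0 then
          PySem.List.pySetD m i
            (PySem.List.pySetD (PySem.List.pyGetD m i []) j
              (PySem.List.pyGetD (PySem.List.pyGetD m i []) j 0 + 1))
        else m) m) (pvZeroM sn)
      = (PySem.List.pyRange 0 (sn : Int) 1).foldl
          (fun m a => m.set a.toNat (pvRowA vals sn a (m.getD a.toNat []))) (pvZeroM sn) := by
    refine pv_foldl_congr_len _ _ _ sn (by intro m a; simp) ?_ _ hZlen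
    intro m a ha hm
    obtain ⟨ha0, haS⟩ := PySem.List.mem_pyRange_one.mp ha
    exact pv_inner_eq'
      (fun j => PySem.List.pyGetD vals a 0 * PySem.List.pyGetD vals j 0 ≠ 0)
      (fun r j => PySem.List.pySetD r j (PySem.List.pyGetD r j 0 + 1)) a _ m ha0 (by omega)
  rw [hA]
  have hKb : ∀ a ∈ PySem.List.pyRange 0 (sn : Int) 1, 0 ≤ a ∧ a.toNat < (pvZeroM sn).length := by
    intro a ha
    obtain ⟨ha0, haS⟩ := PySem.List.mem_pyRange_one.mp ha
    rw [hZlen]; constructor <;> omega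
  have hglen : ∀ (a : Int) (r : List Int), (pvRowA vals sn a r).length = r.length := by
    intro a r
    exact pv_row_length (fun j => PySem.List.pyGetD vals a 0 * PySem.List.pyGetD vals j 0 ≠ 0)
      (fun x => x + 1) _ r
  obtain ⟨hBlen, hBrows, hBentry⟩ := pvFill_main nz (pvZeroM sn) sn (hnz ▸ pv_nz_pairwise vals)
    (fun a ha => ⟨(hnzb a ha).1, by rw [hZlen]; exact (hnzb a ha).2, (hnzb a ha).2⟩) hZrows
  have houtlen := pv_outer_length (pvRowA vals sn) (PySem.List.pyRange 0 (sn : Int) 1) (pvZeroM sn)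
  have houtrows := pv_outer_rows (pvRowA vals sn) sn hglen (PySem.List.pyRange 0 (sn : Int) 1)
    (pvZeroM sn) (fun a ha => (hKb a ha).2) hZrows
  -- entry-level comparison
  have hentry : ∀ i j : Nat, i < sn → j < sn →
      pvEntry ((PySem.List.pyRange 0 (sn : Int) 1).foldl
        (fun m a => m.set a.toNat (pvRowA vals sn a (m.getD a.toNat []))) (pvZeroM sn)) i j
      = pvEntry (pvFill nz (pvZeroM sn)) i j := by
    intro i j hi hj
    have hiK : (i : Int) ∈ PySem.List.pyRange 0 (sn : Int) 1 := by
      rw [PySem.List.mem_pyRange_one]; constructor <;> omega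
    have hrowZ : (pvZeroM sn).getD i [] = List.replicate sn 0 := by
      rw [List.getD_eq_getElem _ _ (by omega)]
      simp [pvZeroM]
    unfold pvEntry
    rw [pv_outer_entry (pvRowA vals sn) _ _ (PySem.List.pairwise_lt_pyRange_one 0 (sn : Int))
        hKb i, if_pos hiK, hrowZ]
    have hrowA : (pvRowA vals sn (i : Int) (List.replicate sn 0)).getD j 0
        = if ((j : Int) ∈ PySem.List.pyRange ((i : Int) + 1) (sn : Int) 1 ∧
            PySem.List.pyGetD vals (i : Int) 0 * PySem.List.pyGetD vals (j : Int) 0 ≠ 0 ∧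
            j < (List.replicate sn (0 : Int)).length) then
            (List.replicate sn (0 : Int)).getD j 0 + 1
          else (List.replicate sn (0 : Int)).getD j 0 := by
      exact pv_row_entry
        (fun x => PySem.List.pyGetD vals (i : Int) 0 * PySem.List.pyGetD vals x 0 ≠ 0)
        (fun x => x + 1) _ _ (PySem.List.nodup_pyRange_one _ _)
        (fun b hb => by have := PySem.List.mem_pyRange_one.mp hb; omega) j
    rw [hrowA]
    have hBE := hBentry i j
    unfold pvEntry at hBE
    have hz1 : (((pvZeroM sn).getD i []).getD j 0 : Int) = 0 := pvZeroM_entry sn i j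
    rw [hBE, hz1, pv_getD_replicate, List.length_replicate]
    have hcond : ((j : Int) ∈ PySem.List.pyRange ((i : Int) + 1) (sn : Int) 1 ∧
          PySem.List.pyGetD vals (i : Int) 0 * PySem.List.pyGetD vals (j : Int) 0 ≠ 0 ∧
          j < sn) ↔ ((i : Int) ∈ nz ∧ (j : Int) ∈ nz ∧ i < j) := by
      rw [PySem.List.mem_pyRange_one, hnzmem i, hnzmem j]
      simp only [PySem.List.pyGetD_natCast]
      rw [mul_ne_zero_iff]
      constructor
      · rintro ⟨⟨h1, h2⟩, ⟨h3, h4⟩, h5⟩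
        exact ⟨⟨hi, h3⟩, ⟨by omega, h4⟩, by omega⟩
      · rintro ⟨⟨_, h3⟩, ⟨h2, h4⟩, h5⟩
        exact ⟨⟨by omega, by omega⟩, ⟨h3, h4⟩, by omega⟩
    rw [if_congr hcond rfl rfl]
    simp
  apply List.ext_getElem (by rw [houtlen, hBlen])
  intro i h1 h2
  have hiS : i < sn := by rw [houtlen, hZlen] at h1; exact h1
  apply List.ext_getElem
  · rw [houtrows _ (List.getElem_mem h1), hBrows _ (List.getElem_mem h2)]
  · intro j hj1 hj2
    have hjS : j < sn := by rw [houtrows _ (List.getElem_mem h1)] at hj1; exact hj1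
    have hE := hentry i j hiS hjS
    unfold pvEntry at hE
    rw [List.getD_eq_getElem _ _ h1, List.getD_eq_getElem _ _ h2] at hE
    rw [List.getD_eq_getElem _ _ hj1, List.getD_eq_getElem _ _ hj2] at hE
    exact hE

-- ===== VERDICT (by name: the statement is the Claim_ definition above) =====
theorem count_shared_single_spec : Claim_equal_count_shared_single := by
  intro line _ _
  show count_shared_single line = count_shared_single_alt line
  unfold count_shared_single count_shared_single_alt
  cases htoks : PySem.Str.split₀ line with
  | nil => rfl
  | cons t0 ts =>
    cases hfd : (match PySem.Str.pyGet? t0 0 with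
      | some c => PySem.Chars.isdigit c
      | none => false : Bool) with
    | true =>
      simp only [hfd, if_true]
      exact pv_main _ _ (by simp)
    | false =>
      simp only [hfd, PySem.List.slice_from_one]
      exact pv_main _ _ (by simp)
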